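-- pv_equiv track=rewrite | github.com/mindsdb/mindsdb | mindsdb/integrations/handlers/tripadvisor_handler/tripadvisor_api.py | getURLQuery
-- ===== SOURCE A (Python) =====
-- def getURLQuery(url: str, params_dict: dict) -> str:
--     """
--     Processing the query and adding parameters to the URL
--     """
--     for idx, (queryParam, value) in enumerate(params_dict.items()):
--         if value is not None or value != "":
--             if value != "" and any(
--                 next_value != "" or value is not None
--                 for next_value in list(params_dict.values())[idx + 1:]
--             ):
--                 url += "{queryParam}={value}&".format(
--                     queryParam=queryParam, value=value
--                 )
--             else:
--                 url += "{queryParam}={value}".format(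
--                     queryParam=queryParam, value=value
--                 )
--     return url
-- ===== SOURCE B (Python) =====
-- def getURLQuery(url: str, params_dict: dict) -> str:
--     """
--     Processing the query and adding parameters to the URL.
--     Single pass: only the last entry never gets a trailing '&'; other
--     entries get one exactly when their value is non-empty.
--     """
--     items = list(params_dict.items())
--     if not items:
--         return url
--     last_key, last_value = items[-1]
--     parts = [
--         "{0}={1}&".format(k, v) if v != "" else "{0}={1}".format(k, v)
--         for k, v in items[:-1]
--     ]
--     parts.append("{0}={1}".format(last_key, last_value))
--     return url + "".join(parts)
-- ===== Notes on version B (the rewrite author's own statement) =====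
-- stated objective: faster
-- what changed: A scans the remaining values list (rebuilt and sliced) inside every iteration to decide whether to append '&'; B does one pass that formats all but the last entry directly (the inner any() is equivalent to 'not the last entry') and joins the pieces once.
import Mathlib
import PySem

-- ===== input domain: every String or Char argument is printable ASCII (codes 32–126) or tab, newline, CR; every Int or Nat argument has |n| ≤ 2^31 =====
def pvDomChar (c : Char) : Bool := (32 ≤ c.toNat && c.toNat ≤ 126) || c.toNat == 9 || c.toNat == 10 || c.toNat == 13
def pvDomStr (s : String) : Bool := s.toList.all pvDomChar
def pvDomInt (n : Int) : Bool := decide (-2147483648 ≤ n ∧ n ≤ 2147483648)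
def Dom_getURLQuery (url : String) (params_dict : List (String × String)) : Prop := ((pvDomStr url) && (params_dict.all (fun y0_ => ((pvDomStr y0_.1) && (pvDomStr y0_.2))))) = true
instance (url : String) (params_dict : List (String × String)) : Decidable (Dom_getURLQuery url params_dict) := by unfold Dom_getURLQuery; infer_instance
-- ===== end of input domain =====

-- B replaces A's quadratic per-entry scan of the remaining values by a single pass
-- that treats the last entry specially (objective: faster).

-- ===== PORT A =====
-- A's loop: for idx, (k, v) in enumerate(items): the two nested ifs, appending to url.
-- `value is not None` is True for a str value, ported literally as `true`.
def getURLQueryLoopA (url : String) (values : List String) (idx : Nat) :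
    List (String × String) → String
  | [] => url
  | (k, v) :: rest =>
      let url' :=
        if true || decide (v ≠ "") then
          -- any(next_value != "" or value is not None for next_value in list(values)[idx+1:])
          if decide (v ≠ "") &&
              ((PySem.List.slice values (some ((idx : Int) + 1)) none).any
                (fun nv => decide (nv ≠ "") || true)) then
            url ++ k ++ "=" ++ v ++ "&"
          else
            url ++ k ++ "=" ++ v
        else url
      getURLQueryLoopA url' values (idx + 1) rest

def getURLQuery (url : String) (params_dict : List (String × String)) : String :=
  let d := PySem.Dict.ofList params_dict
  getURLQueryLoopA url (PySem.Dict.values d) 0 (PySem.Dict.items d)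

-- ===== PORT B =====
-- Source B: items[:-1] as a comprehension of ready-made pieces, items[-1] without '&', one join.
def getURLQuery_alt (url : String) (params_dict : List (String × String)) : String :=
  let items := PySem.Dict.items (PySem.Dict.ofList params_dict)
  if h : items = [] then url
  else
    let last := items.getLast h
    let parts := (items.dropLast.map (fun kv =>
      if kv.2 ≠ "" then kv.1 ++ "=" ++ kv.2 ++ "&" else kv.1 ++ "=" ++ kv.2))
      ++ [last.1 ++ "=" ++ last.2]
    url ++ PySem.Str.join "" parts

-- ===== PRECONDITION & SPEC =====
def Spec_getURLQuery (url : String) (params_dict : List (String × String)) (out : String) : Prop := out = getURLQuery_alt url params_dict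
instance (url : String) (params_dict : List (String × String)) (out : String) : Decidable (Spec_getURLQuery url params_dict out) := by unfold Spec_getURLQuery; infer_instance

-- ===== CLAIM (what is proved, stated in full; the proofs are below) =====
def Claim_equal_getURLQuery : Prop := ∀ (url : String) (params_dict : List (String × String)), Dom_getURLQuery url params_dict → Spec_getURLQuery url params_dict (getURLQuery url params_dict)

-- ===== LEMMAS AND PROOFS =====

-- the piece B builds for a non-last entry
def pvPiece (kv : String × String) : String :=
  if kv.2 ≠ "" then kv.1 ++ "=" ++ kv.2 ++ "&" else kv.1 ++ "=" ++ kv.2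

lemma pv_join_empty_cons (p : String) (ps : List String) :
    PySem.Str.join "" (p :: ps) = p ++ PySem.Str.join "" ps := by
  simp [PySem.Str.join, PySem.Chars.join, List.intercalate]
  cases ps with
  | nil => simp
  | cons q qs => simp [List.flatten, String.ofList_append]
lemma pv_loop_eq (items : List (String × String)) :
    ∀ (url : String) (values : List String) (idx : Nat),
      values.drop (idx + 1) = (items.map (·.2)).tail →
      getURLQueryLoopA url values idx items =
        (if h : items = [] then url
         else url ++ PySem.Str.join ""
            (items.dropLast.map pvPiece ++ [(items.getLast h).1 ++ "=" ++ (items.getLast h).2])) := by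
  induction items with
  | nil => intro url values idx _; rfl
  | cons kv rest ih =>
    intro url values idx hinv
    obtain ⟨k, v⟩ := kv
    have hslice : PySem.List.slice values (some ((idx : Int) + 1)) none = values.drop (idx + 1) := by
      have := PySem.List.slice_from_natCast (xs := values) (a := idx + 1)
      simpa using this
    simp only [getURLQueryLoopA, hslice, hinv]
    cases rest with
    | nil =>
      simp [getURLQueryLoopA, PySem.Str.join, PySem.Chars.join, List.intercalate,
        String.ofList_append, String.append_assoc]
      rw [show ('=' :: v.toList) = "=".toList ++ v.toList from rfl,
        String.ofList_append, String.ofList_toList]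
      rw [String.ofList_toList]
    | cons q qs =>
      rw [ih _ values (idx + 1) (by rw [← List.tail_drop, hinv]; rfl)]
      simp only [List.cons_ne_nil, dif_neg, not_false_iff]
      by_cases hv : v = "" <;>
        simp [hv, pvPiece, pv_join_empty_cons, List.getLast, String.append_assoc]

-- ===== VERDICT =====
theorem getURLQuery_spec : Claim_equal_getURLQuery := by
  intro url params_dict _
  unfold Spec_getURLQuery getURLQuery getURLQuery_alt
  rw [pv_loop_eq (PySem.Dict.items (PySem.Dict.ofList params_dict)) url
        (PySem.Dict.values (PySem.Dict.ofList params_dict)) 0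
        (by simp [PySem.Dict.values, List.drop_one])]
  rfl
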